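-- pv_equiv track=rewrite | github.com/xblam/solving-miscellaneous-problems | ravioli.py | make_ravioli
-- ===== SOURCE A (Python) =====
-- def make_ravioli(size):
--     line = ''
--     a = 'abcdefghijklmnopqrstuvwxyz'
--     ra = 'zyxwvutsrqponmlkjihgfedcba'
--
--     letter = (a[size-1])
--     for j in range(1,size):
--         i = size-j
--         al = a[i+1:a.index(letter)+1]
--         ral = ra[ra.index(letter):len(ra)-i]
--         dashes = (size-len(ral))*'--'
--         middle = ''
--         for k in ral+al:
--             middle += k+'-'
--         middle = middle[:len(middle)-1]
--         line+=(dashes+middle+dashes)+"\n"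
--
--     for i in range(size):
--         al = a[i+1:a.index(letter)+1]
--         ral = ra[ra.index(letter):len(ra)-i]
--         dashes = (size-len(ral))*'--'
--         middle = ''
--         for k in ral+al:
--             middle += k+'-'
--         middle = middle[:len(middle)-1]
--         line+=(dashes+middle+dashes)+'\n'
--     return(line[0:len(line)-1])
-- ===== SOURCE B (Python) =====
-- def make_ravioli(size):
--     # Closed-form per-cell rule on the rectangular grid: cell (r, c)
--     # is a letter iff c is even and k = |r-(size-1)| + |c//2-(size-1)| < size,
--     # namely a[k]; every other cell is a dash.
--     a = 'abcdefghijklmnopqrstuvwxyz'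
--     rows = []
--     for r in range(2 * size - 1):
--         row = []
--         for c in range(4 * size - 3):
--             k = abs(r - (size - 1)) + abs(c // 2 - (size - 1))
--             row.append(a[k] if c % 2 == 0 and k < size else '-')
--         rows.append(''.join(row))
--     return '\n'.join(rows)
-- ===== Notes on version B (the rewrite author's own statement) =====
-- stated objective: alternative
-- what changed: B abandons A's per-row slice/index/join construction entirely: it fills the whole rectangular figure cell by cell from a closed-form rule (a cell holds the letter whose alphabet index is the sum of its row's and its column-pair's distances from the figure's centre, when that index is in range and the column is even; every other cell is a dash), instead of A's two duplicated loops building each row from alphabet slices, .index scans and dash multiplication.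
import Mathlib
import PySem

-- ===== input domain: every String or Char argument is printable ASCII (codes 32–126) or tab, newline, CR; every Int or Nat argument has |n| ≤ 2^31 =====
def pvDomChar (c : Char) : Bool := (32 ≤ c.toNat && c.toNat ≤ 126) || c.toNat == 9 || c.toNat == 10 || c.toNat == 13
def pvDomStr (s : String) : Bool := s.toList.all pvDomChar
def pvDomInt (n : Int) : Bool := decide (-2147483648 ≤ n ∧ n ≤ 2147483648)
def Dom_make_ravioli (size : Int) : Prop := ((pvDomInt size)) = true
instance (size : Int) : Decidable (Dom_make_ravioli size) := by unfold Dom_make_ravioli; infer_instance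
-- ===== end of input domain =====

-- B replaces A's slice/index row construction with a closed-form per-cell rule
-- over the whole rectangular figure; objective: alternative (same asymptotic cost).

-- ===== PORT A =====
-- literal transliteration of A; strings handled as List Char (PySem.Chars).
-- 'a.index(letter)' is ported as PySem.Chars.find: letter always occurs in a
-- (it was read from a), so index == find; likewise for ra.
def make_ravioli (size : Int) : String :=
  let a := "abcdefghijklmnopqrstuvwxyz".toList
  let ra := "zyxwvutsrqponmlkjihgfedcba".toList
  match PySem.List.pyGet? a (size - 1) with
  | none => ""  -- a[size-1] raises IndexError: excluded by Pre_
  | some letter =>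
    let line1 := (PySem.List.pyRange 1 size 1).foldl (fun line j =>
      let i := size - j
      let al := PySem.List.slice a (some (i + 1)) (some (PySem.Chars.find a [letter] + 1))
      let ral := PySem.List.slice ra (some (PySem.Chars.find ra [letter])) (some ((ra.length : Int) - i))
      let dashes := PySem.List.pyRepeat ['-', '-'] (size - (ral.length : Int))
      let middle0 := (ral ++ al).foldl (fun m k => m ++ [k, '-']) []
      let middle := PySem.List.slice middle0 none (some ((middle0.length : Int) - 1))
      line ++ (dashes ++ middle ++ dashes) ++ ['\n']) []
    let line2 := (PySem.List.pyRange 0 size 1).foldl (fun line i =>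
      let al := PySem.List.slice a (some (i + 1)) (some (PySem.Chars.find a [letter] + 1))
      let ral := PySem.List.slice ra (some (PySem.Chars.find ra [letter])) (some ((ra.length : Int) - i))
      let dashes := PySem.List.pyRepeat ['-', '-'] (size - (ral.length : Int))
      let middle0 := (ral ++ al).foldl (fun m k => m ++ [k, '-']) []
      let middle := PySem.List.slice middle0 none (some ((middle0.length : Int) - 1))
      line ++ (dashes ++ middle ++ dashes) ++ ['\n']) line1
    String.ofList (PySem.List.slice line2 (some 0) (some ((line2.length : Int) - 1)))

-- ===== PORT B =====
-- transliteration of Source B: nested index loops filling a rectangular grid from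
-- the closed-form cell rule.  'a[k]' is guarded by k < size, in range inside Pre_,
-- so '(pyGet? …).getD '-'' is exact there; ''.join over single chars is the list itself.
def make_ravioli_alt (size : Int) : String :=
  let a := "abcdefghijklmnopqrstuvwxyz".toList
  let rows := (PySem.List.pyRange 0 (2 * size - 1) 1).map (fun r =>
    (PySem.List.pyRange 0 (4 * size - 3) 1).map (fun c =>
      let k : Int := ((r - (size - 1)).natAbs : Int) + ((PySem.Int.floordiv c 2 - (size - 1)).natAbs : Int)
      if PySem.Int.mod c 2 == 0 && k < size then (PySem.List.pyGet? a k).getD '-' else '-'))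
  String.ofList (PySem.Chars.join ['\n'] rows)

-- ===== PRECONDITION & SPEC =====
-- Pre_ excludes exactly the inputs where A raises IndexError at a[size-1]
-- (size > 26 or size < -25); on every other input A returns.
def Pre_make_ravioli (size : Int) : Prop := -25 ≤ size ∧ size ≤ 26
instance (size : Int) : Decidable (Pre_make_ravioli size) := by unfold Pre_make_ravioli; infer_instance
def pvWitness_make_ravioli : Int := (5)

def Spec_make_ravioli (size : Int) (out : String) : Prop := out = make_ravioli_alt size
instance (size : Int) (out : String) : Decidable (Spec_make_ravioli size out) := by unfold Spec_make_ravioli; infer_instance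

-- ===== CLAIM (what is proved, stated in full; the proofs are below) =====
def Claim_equal_make_ravioli : Prop := ∀ (size : Int), Dom_make_ravioli size → Pre_make_ravioli size → Spec_make_ravioli size (make_ravioli size)

-- ===== LEMMAS AND PROOFS =====

def pvA : List Char := "abcdefghijklmnopqrstuvwxyz".toList

lemma pv_aL : "abcdefghijklmnopqrstuvwxyz".toList = pvA := rfl

lemma pv_ra : "zyxwvutsrqponmlkjihgfedcba".toList = pvA.reverse := by decide

lemma pv_len_a : pvA.length = 26 := by decide

-- the common row: i leading/trailing dash pairs around the joined letter palindrome
def pvRow (n i : Nat) : List Char :=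
  PySem.List.pyRepeat ['-', '-'] (i : Int) ++
    PySem.Chars.join ['-']
      ((((pvA.drop i).take (n - i)).reverse ++ (pvA.drop (i + 1)).take (n - 1 - i)).map (fun c => [c])) ++
    PySem.List.pyRepeat ['-', '-'] (i : Int)

-- B's row at distance i from the middle row (the cell rule depends on r only through i)
def pvGrid (n i : Nat) : List Char :=
  (PySem.List.pyRange 0 (4 * (n:Int) - 3) 1).map (fun c =>
      let k : Int := (i : Int) + ((PySem.Int.floordiv c 2 - ((n:Int) - 1)).natAbs : Int)
      if PySem.Int.mod c 2 == 0 && k < (n:Int) then (PySem.List.pyGet? pvA k).getD '-' else '-')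

-- the per-cell rule reproduces A's slice/join row, checked for every admissible (n, i)
set_option maxRecDepth 100000 in
set_option maxHeartbeats 4000000 in
lemma pv_rows : ∀ n : Fin 27, ∀ i : Fin 27, i < n → pvGrid n i = pvRow n i := by decide

lemma pv_find_a (k : Nat) (hk : k < 26) :
    PySem.Chars.find pvA [pvA[k]'(by rw [pv_len_a]; exact hk)] = (k : Int) := by
  have h : ∀ k : Fin 26, PySem.Chars.find pvA [pvA[k.val]'(by rw [pv_len_a]; exact k.isLt)] = (k.val : Int) := by decide
  exact h ⟨k, hk⟩

lemma pv_find_ra (k : Nat) (hk : k < 26) :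
    PySem.Chars.find pvA.reverse [pvA[k]'(by rw [pv_len_a]; exact hk)] = ((25 - k : Nat) : Int) := by
  have h : ∀ k : Fin 26, PySem.Chars.find pvA.reverse [pvA[k.val]'(by rw [pv_len_a]; exact k.isLt)] = ((25 - k.val : Nat) : Int) := by decide
  exact h ⟨k, hk⟩

-- xs[:len(xs)-1] is dropLast
lemma pv_trim (l : List Char) :
    PySem.List.slice l none (some ((l.length : Int) - 1)) = l.dropLast := by
  cases l with
  | nil => simp [PySem.List.slice_to_neg_one]
  | cons x t =>
    have hb : (0:Int) ≤ ((x :: t).length : Int) - 1 := by simp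
    rw [PySem.List.slice_to _ hb]
    rw [List.dropLast_eq_take]
    congr 1
    simp

-- the character-accumulating '-'-join loop, trimmed, is join
lemma pv_J (l : List Char) :
    (l.flatMap (fun k => [k, '-'])).dropLast = PySem.Chars.join ['-'] (l.map (fun c => [c])) := by
  induction l with
  | nil => simp [PySem.Chars.join_nil]
  | cons k t ih =>
    cases t with
    | nil => simp [PySem.Chars.join_singleton]
    | cons k' t' =>
      have hne : (k' :: t').flatMap (fun k => [k, '-']) ≠ [] := by simp
      rw [List.flatMap_cons]
      rw [List.dropLast_append_of_ne_nil hne]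
      rw [ih]
      simp [PySem.Chars.join_cons_cons]

-- the row-accumulating '\n' loop, trimmed, is join
lemma pv_K (rows : List (List Char)) (h : rows ≠ []) :
    (rows.flatMap (fun r => r ++ ['\n'])).dropLast = PySem.Chars.join ['\n'] rows := by
  induction rows with
  | nil => simp at h
  | cons r t ih =>
    cases t with
    | nil => simp [PySem.Chars.join_singleton]
    | cons r' t' =>
      have hne : (r' :: t').flatMap (fun r => r ++ ['\n']) ≠ [] := by simp
      rw [List.flatMap_cons]
      rw [List.dropLast_append_of_ne_nil hne]
      rw [ih (by simp)]
      simp [PySem.Chars.join_cons_cons]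

-- [n-1, …, 1] two ways
lemma pv_desc (n : Nat) (h : 1 ≤ n) :
    (List.range (n - 1)).map (fun k => n - 1 - k) = ((List.range n).drop 1).reverse := by
  apply List.ext_getElem
  · simp
  · intro k h1 h2
    simp only [List.getElem_map, List.getElem_range, List.getElem_reverse, List.getElem_drop]
    simp at h1 h2 ⊢
    omega

-- the mirrored index sequence |r-(n-1)| for r in range(2n-1)
lemma pv_mirror (n : Nat) (h : 1 ≤ n) :
    (List.range (2 * n - 1)).map (fun r : Nat => ((0 : Int) + (r : Int) - ((n : Int) - 1)).natAbs)
      = ((List.range n).drop 1).reverse ++ List.range n := by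
  apply List.ext_getElem
  · simp; omega
  · intro k h1 h2
    simp only [List.getElem_map, List.getElem_range]
    by_cases hk : k < n - 1
    · rw [List.getElem_append_left (by simp; omega)]
      simp only [List.getElem_reverse, List.getElem_drop]
      simp
      omega
    · rw [List.getElem_append_right (by simp; omega)]
      simp
      omega

-- the (zeta-reduced) row expression of port A, with the find-values already rewritten
def pvBody (n : Nat) (i : Int) : List Char :=
  PySem.List.pyRepeat ['-', '-']
      (↑n - ↑(PySem.List.slice pvA.reverse (some ↑(26 - n)) (some (↑pvA.reverse.length - i))).length) ++
    PySem.List.slice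
      (List.foldl (fun m k => m ++ [k, '-']) []
        (PySem.List.slice pvA.reverse (some ↑(26 - n)) (some (↑pvA.reverse.length - i)) ++
          PySem.List.slice pvA (some (i + 1)) (some (↑(n - 1) + 1))))
      none
      (some
        (↑(List.foldl (fun m k => m ++ [k, '-']) []
                (PySem.List.slice pvA.reverse (some ↑(26 - n)) (some (↑pvA.reverse.length - i)) ++
                  PySem.List.slice pvA (some (i + 1)) (some (↑(n - 1) + 1)))).length -
          1)) ++
    PySem.List.pyRepeat ['-', '-']
      (↑n - ↑(PySem.List.slice pvA.reverse (some ↑(26 - n)) (some (↑pvA.reverse.length - i))).length)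

lemma pv_bodyA (n : Nat) (hn1 : 1 ≤ n) (hn26 : n ≤ 26) (i : Int) (h0 : 0 ≤ i) (hi : i < (n : Int)) :
    pvBody n i = pvRow n i.toNat := by
  have hii : i = (i.toNat : Int) := by omega
  set iN := i.toNat with hiNdef
  unfold pvBody
  rw [hii]
  have hlenra : ((pvA.reverse.length : Int) - (iN : Int)) = ((26 - iN : Nat) : Int) := by
    simp [pv_len_a]; omega
  rw [hlenra, PySem.List.slice_natCast]
  have h1 : 26 - iN - (26 - n) = n - iN := by omega
  rw [h1, List.drop_reverse]
  have h2 : pvA.length - (26 - n) = n := by rw [pv_len_a]; omega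
  rw [h2, List.take_reverse]
  have h3 : (List.take n pvA).length = n := by simp [pv_len_a]; omega
  rw [h3]
  have h4 : n - (n - iN) = iN := by omega
  rw [h4, List.drop_take]
  have h5 : (iN : Int) + 1 = ((iN + 1 : Nat) : Int) := by omega
  have h6 : ((n - 1 : Nat) : Int) + 1 = ((n : Nat) : Int) := by omega
  rw [h5, h6, PySem.List.slice_natCast]
  rw [PySem.List.foldl_append_eq_flatMap (fun k => [k, '-'])]
  rw [List.nil_append, pv_trim, pv_J]
  have hlen : ((List.take (n - iN) (List.drop iN pvA)).reverse.length : Int) = ((n - iN : Nat) : Int) := by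
    simp [pv_len_a]; omega
  rw [hlen]
  have h7 : ((n : Nat) : Int) - ((n - iN : Nat) : Int) = (iN : Int) := by omega
  rw [h7]
  unfold pvRow
  have h8 : n - (iN + 1) = n - 1 - iN := by omega
  rw [h8]

-- ===== VERDICT (by name: the statement is the Claim_ definition above) =====
theorem make_ravioli_spec : Claim_equal_make_ravioli := by
  intro size _ hpre
  obtain ⟨hlo, hhi⟩ := hpre
  unfold Spec_make_ravioli
  by_cases hpos : 1 ≤ size
  · obtain ⟨n, rfl⟩ : ∃ n : Nat, size = (n : Int) := ⟨size.toNat, by omega⟩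
    have hn1 : 1 ≤ n := by exact_mod_cast hpos
    have hn26 : n ≤ 26 := by exact_mod_cast hhi
    have hlt : n - 1 < pvA.length := by rw [pv_len_a]; omega
    have hcast : (n : Int) - 1 = ((n - 1 : Nat) : Int) := by omega
    have hget : PySem.List.pyGet? pvA ((n:Int) - 1) = some (pvA[n-1]'hlt) := by
      rw [hcast, PySem.List.pyGet?_natCast, List.getElem?_eq_getElem hlt]
    have hfA : PySem.Chars.find pvA [pvA[n-1]'hlt] = ((n - 1 : Nat) : Int) := pv_find_a (n-1) (by omega)
    have hfR : PySem.Chars.find pvA.reverse [pvA[n-1]'hlt] = ((26 - n : Nat) : Int) := by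
      have := pv_find_ra (n-1) (by omega)
      rw [this]; congr 1; omega
    simp only [make_ravioli, make_ravioli_alt, pv_aL, pv_ra, hget, hfA, hfR]
    -- LHS: replace both loop bodies by pvRow
    rw [PySem.List.foldl_congr_mem (PySem.List.pyRange 1 (n : Int)) _
        (fun acc j => acc ++ (pvRow n (((n : Int) - j).toNat) ++ ['\n'])) []
        (by
          intro acc j hj
          rw [PySem.List.mem_pyRange_one] at hj
          show (acc ++ pvBody n ((n : Int) - j)) ++ ['\n'] = _
          rw [pv_bodyA n hn1 hn26 ((n : Int) - j) (by omega) (by omega), List.append_assoc])]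
    rw [PySem.List.foldl_congr_mem (PySem.List.pyRange 0 (n : Int)) _
        (fun acc i => acc ++ (pvRow n i.toNat ++ ['\n']))
        _
        (by
          intro acc i hi
          rw [PySem.List.mem_pyRange_one] at hi
          show (acc ++ pvBody n i) ++ ['\n'] = _
          rw [pv_bodyA n hn1 hn26 i (by omega) (by omega), List.append_assoc])]
    rw [PySem.List.foldl_append_eq_flatMap (fun j => pvRow n (((n : Int) - j).toNat) ++ ['\n'])]
    rw [PySem.List.foldl_append_eq_flatMap (fun i : Int => pvRow n i.toNat ++ ['\n'])]
    rw [List.nil_append]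
    have hA : List.flatMap (fun j => pvRow n (((n : Int) - j).toNat) ++ ['\n']) (PySem.List.pyRange 1 (n : Int))
        = List.flatMap (fun r => r ++ ['\n']) (List.map (pvRow n) (((List.range n).drop 1).reverse)) := by
      rw [PySem.List.pyRange_one, List.flatMap_map]
      have ht : ((n : Int) - 1).toNat = n - 1 := by omega
      rw [ht]
      have hfun : (fun k : Nat => pvRow n (((n : Int) - (1 + (k : Int))).toNat) ++ ['\n'])
          = fun k : Nat => pvRow n (n - 1 - k) ++ ['\n'] := by
        funext k
        congr 2
        omega
      rw [hfun]
      rw [← List.flatMap_map (fun k : Nat => n - 1 - k) (fun i : Nat => pvRow n i ++ ['\n'])]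
      rw [pv_desc n hn1]
      rw [List.flatMap_map (pvRow n) (fun r => r ++ ['\n'])]
    have hB : List.flatMap (fun i : Int => pvRow n i.toNat ++ ['\n']) (PySem.List.pyRange 0 (n : Int))
        = List.flatMap (fun r => r ++ ['\n']) (List.map (pvRow n) (List.range n)) := by
      rw [PySem.List.pyRange_one, List.flatMap_map]
      have ht : ((n : Int) - 0).toNat = n := by omega
      rw [ht]
      have hfun : (fun k : Nat => pvRow n ((0 + (k : Int)).toNat) ++ ['\n'])
          = fun k : Nat => pvRow n k ++ ['\n'] := by
        funext k
        congr 2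
        omega
      rw [hfun]
      rw [List.flatMap_map (pvRow n) (fun r => r ++ ['\n'])]
    rw [hA, hB, ← List.flatMap_append]
    rw [PySem.List.slice_zero_start, pv_trim]
    rw [pv_K _ (by simp; omega)]
    rw [← List.map_append]
    -- RHS: B's grid rows are the same mirrored row list
    have hrows : List.map
          (fun r =>
            List.map
              (fun c =>
                let k : Int := ((r - ((n:Int) - 1)).natAbs : Int) + ((PySem.Int.floordiv c 2 - ((n:Int) - 1)).natAbs : Int)
                if PySem.Int.mod c 2 == 0 && k < (n:Int) then (PySem.List.pyGet? pvA k).getD '-' else '-')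
              (PySem.List.pyRange 0 (4 * (n:Int) - 3) 1))
          (PySem.List.pyRange 0 (2 * (n:Int) - 1) 1)
        = List.map (pvRow n) (((List.range n).drop 1).reverse ++ List.range n) := by
      have houter : PySem.List.pyRange 0 (2 * (n:Int) - 1) 1
          = List.map (fun k : Nat => (0 : Int) + (k : Int)) (List.range (2 * n - 1)) := by
        rw [PySem.List.pyRange_one, show (2 * (n:Int) - 1 - 0).toNat = 2 * n - 1 from by omega]
      rw [houter, List.map_map]
      have hstep : ∀ r ∈ List.range (2 * n - 1),
          ((fun r =>
            List.map
              (fun c =>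
                let k : Int := ((r - ((n:Int) - 1)).natAbs : Int) + ((PySem.Int.floordiv c 2 - ((n:Int) - 1)).natAbs : Int)
                if PySem.Int.mod c 2 == 0 && k < (n:Int) then (PySem.List.pyGet? pvA k).getD '-' else '-')
              (PySem.List.pyRange 0 (4 * (n:Int) - 3) 1)) ∘ (fun k : Nat => (0 : Int) + (k : Int))) r
          = pvRow n (((0 : Int) + (r : Int) - ((n:Int) - 1)).natAbs) := by
        intro r hr
        rw [List.mem_range] at hr
        have hi : (((0 : Int) + (r : Int) - ((n:Int) - 1)).natAbs) < n := by omega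
        have hgoal := pv_rows ⟨n, by omega⟩ ⟨(((0 : Int) + (r : Int) - ((n:Int) - 1)).natAbs), by omega⟩
          (by simpa using hi)
        exact hgoal
      rw [List.map_congr_left hstep]
      rw [show (fun r : Nat => pvRow n (((0 : Int) + (r : Int) - ((n:Int) - 1)).natAbs))
            = (pvRow n) ∘ (fun r : Nat => (((0 : Int) + (r : Int) - ((n:Int) - 1)).natAbs)) from rfl]
      rw [← List.map_map, pv_mirror n hn1]
    rw [hrows]
  · -- size ≤ 0 : both sides are ""
    have h0 : size ≤ 0 := by omega
    have e1 : PySem.List.pyRange 1 size 1 = [] := PySem.List.pyRange_one_eq_nil (by omega)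
    have e2 : PySem.List.pyRange 0 size 1 = [] := PySem.List.pyRange_one_eq_nil (by omega)
    have e3 : PySem.List.pyRange 0 (2 * size - 1) 1 = [] := PySem.List.pyRange_one_eq_nil (by omega)
    simp only [make_ravioli, make_ravioli_alt, pv_aL, pv_ra, e1, e2, e3]
    rcases hg : PySem.List.pyGet? pvA (size - 1) with _ | letter <;>
      simp [PySem.List.slice_zero_start, PySem.List.slice_to_neg_one,
            PySem.Chars.join, List.intercalate]
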